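-- pv_equiv track=rewrite | github.com/imReznor/conversionIP | script.py | validar_binario
-- ===== SOURCE A (Python) =====
-- def validar_binario(bin_str):
--     partes = bin_str.split(".")
--     if len(partes) != 4:
--         return False
--     for parte in partes:
--         if len(parte) != 8 or not all(bit in "01" for bit in parte):
--             return False
--     return True
-- ===== SOURCE B (Python) =====
-- def _groups(cs, k):
--     # consume one 8-bit group, then (if k > 0) a dot and recurse
--     if len(cs) < 8 or any(c not in "01" for c in cs[:8]):
--         return False
--     rest = cs[8:]
--     if k == 0:
--         return rest == ""
--     return rest[:1] == "." and _groups(rest[1:], k - 1)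
--
-- def validar_binario(bin_str):
--     return _groups(bin_str, 3)
-- ===== Notes on version B (the rewrite author's own statement) =====
-- stated objective: alternative
-- what changed: Replaced split-on-dot followed by a loop over the list of parts with a recursive-descent checker that consumes one 8-bit group and one separator at a time, never materialising the list of parts.
import Mathlib
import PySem

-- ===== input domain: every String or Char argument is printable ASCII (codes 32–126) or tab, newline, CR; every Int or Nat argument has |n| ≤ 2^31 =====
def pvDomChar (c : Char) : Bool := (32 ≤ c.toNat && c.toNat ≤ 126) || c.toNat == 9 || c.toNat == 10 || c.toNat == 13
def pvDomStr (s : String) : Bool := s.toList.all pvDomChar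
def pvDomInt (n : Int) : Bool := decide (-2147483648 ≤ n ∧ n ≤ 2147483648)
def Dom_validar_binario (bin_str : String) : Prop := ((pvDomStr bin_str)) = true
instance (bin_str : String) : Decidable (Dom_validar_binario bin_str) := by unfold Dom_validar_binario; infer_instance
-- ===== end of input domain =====

-- B is an alternative implementation: recursive descent (consume one 8-bit group, then a dot,
-- three times) instead of A's split('.') followed by a loop over the list of parts.

-- ===== PORT A =====
def validar_binario (bin_str : String) : Bool :=
  let partes := (PySem.Str.split? bin_str ".").getD []
  if partes.length ≠ 4 then false
  else partes.all (fun parte =>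
    !(decide (PySem.Str.len parte ≠ 8) ||
      !(parte.toList.all (fun bit => PySem.Chars.isIn [bit] "01".toList))))

-- ===== PORT B =====
def pvGroups : Nat → List Char → Bool
  | k, cs =>
    if cs.length < 8 || !((cs.take 8).all (fun c => decide (c = '0') || decide (c = '1'))) then
      false
    else
      let rest := cs.drop 8
      match k with
      | 0 => rest == []
      | k + 1 => rest.take 1 == ['.'] && pvGroups k (rest.drop 1)

def validar_binario_alt (bin_str : String) : Bool := pvGroups 3 bin_str.toList

-- ===== PRECONDITION & SPEC =====
def Spec_validar_binario (bin_str : String) (out : Bool) : Prop := out = validar_binario_alt bin_str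
instance (bin_str : String) (out : Bool) : Decidable (Spec_validar_binario bin_str out) := by unfold Spec_validar_binario; infer_instance

-- ===== CLAIM (what is proved, stated in full; the proofs are below) =====
def Claim_equal_validar_binario : Prop := ∀ (bin_str : String), Dom_validar_binario bin_str → Spec_validar_binario bin_str (validar_binario bin_str)

-- ===== LEMMAS AND PROOFS =====

-- a direct recursive model of splitting a list of chars on '.'
def pvSplitDot : List Char → List (List Char)
  | [] => [[]]
  | c :: cs =>
    if c = '.' then [] :: pvSplitDot cs
    else (c :: (pvSplitDot cs).headD []) :: (pvSplitDot cs).tail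

def pvJoinDot : List (List Char) → List Char
  | [] => []
  | [p] => p
  | p :: ps => p ++ '.' :: pvJoinDot ps

def pvOk (p : List Char) : Bool :=
  decide (p.length = 8) && p.all (fun c => decide (c = '0') || decide (c = '1'))

theorem pvSplitDot_ne_nil (cs : List Char) : pvSplitDot cs ≠ [] := by
  induction cs with
  | nil => simp [pvSplitDot]
  | cons c cs ih => simp [pvSplitDot]; split_ifs <;> simp

theorem pvGo_spec (fuel : Nat) (l cur : List Char) (acc : List (List Char))
    (h : l.length ≤ fuel) :
    PySem.Chars.splitOn.go ['.'] fuel l cur acc =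
      acc.reverse ++ (cur.reverse ++ (pvSplitDot l).headD []) :: (pvSplitDot l).tail := by
  induction fuel generalizing l cur acc with
  | zero =>
    have : l = [] := by cases l <;> simp_all
    subst this
    simp [PySem.Chars.splitOn.go, pvSplitDot]
  | succ fuel ih =>
    cases l with
    | nil => simp [PySem.Chars.splitOn.go, pvSplitDot]
    | cons c rest =>
      by_cases hc : c = '.'
      · subst hc
        have hpre : List.isPrefixOf ['.'] ('.' :: rest) = true := by simp [List.isPrefixOf]
        rw [PySem.Chars.splitOn.go]
        simp only [hpre, if_pos]
        rw [ih _ _ _ (by simpa using h)]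
        have hne := pvSplitDot_ne_nil rest
        simp [pvSplitDot]
        cases hps : pvSplitDot rest with
        | nil => exact absurd hps hne
        | cons p ps => simp
      · have hpre : List.isPrefixOf ['.'] (c :: rest) = false := by
          simp [List.isPrefixOf]; exact fun hh => absurd hh.symm hc
        rw [PySem.Chars.splitOn.go]
        simp only [hpre, Bool.false_eq_true, if_false]
        rw [ih _ _ _ (by simpa using h)]
        simp [pvSplitDot, hc]

theorem pvSplitOn_eq_splitDot (cs : List Char) :
    PySem.Chars.splitOn cs ['.'] = pvSplitDot cs := by
  rw [PySem.Chars.splitOn, pvGo_spec _ _ _ _ (by omega)]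
  have hne := pvSplitDot_ne_nil cs
  cases hps : pvSplitDot cs with
  | nil => exact absurd hps hne
  | cons p ps => simp

theorem pvJoinDot_cons (p : List Char) (ps : List (List Char)) (h : ps ≠ []) :
    pvJoinDot (p :: ps) = p ++ '.' :: pvJoinDot ps := by
  cases ps with
  | nil => simp_all
  | cons q qs => rfl

theorem pvJoinDot_splitDot (cs : List Char) : pvJoinDot (pvSplitDot cs) = cs := by
  induction cs with
  | nil => simp [pvSplitDot, pvJoinDot]
  | cons c cs ih =>
    have hne := pvSplitDot_ne_nil cs
    by_cases hc : c = '.'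
    · subst hc
      rw [pvSplitDot, if_pos rfl, pvJoinDot_cons _ _ hne, ih]
      simp
    · rw [pvSplitDot, if_neg hc]
      cases hps : pvSplitDot cs with
      | nil => exact absurd hps hne
      | cons p ps =>
        rw [hps] at ih
        cases ps with
        | nil => simpa [pvJoinDot] using ih
        | cons q qs =>
          rw [pvJoinDot_cons _ _ (by simp)] at ih
          rw [pvJoinDot_cons _ _ (by simp)]
          simpa using ih

theorem pvNodot_splitDot (cs : List Char) : ∀ p ∈ pvSplitDot cs, '.' ∉ p := by
  induction cs with
  | nil => simp [pvSplitDot]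
  | cons c cs ih =>
    have hne := pvSplitDot_ne_nil cs
    by_cases hc : c = '.'
    · subst hc; rw [pvSplitDot, if_pos rfl]
      intro p hp
      rcases List.mem_cons.mp hp with h | h
      · simp [h]
      · exact ih p h
    · rw [pvSplitDot, if_neg hc]
      intro p hp
      cases hps : pvSplitDot cs with
      | nil => exact absurd hps hne
      | cons q qs =>
        rw [hps] at hp
        rcases List.mem_cons.mp hp with h | h
        · subst h
          simp only [List.headD_cons, List.mem_cons]
          rintro (h | h)
          · exact hc h.symm
          · exact ih q (by simp [hps]) h
        · exact ih p (by rw [hps]; exact List.mem_cons_of_mem _ (by simpa using h))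

theorem pvSplitDot_nodot (p : List Char) (h : '.' ∉ p) : pvSplitDot p = [p] := by
  induction p with
  | nil => simp [pvSplitDot]
  | cons c cs ih =>
    have hc : c ≠ '.' := fun hh => h (by simp [hh])
    rw [pvSplitDot, if_neg hc, ih (fun hh => h (by simp [hh]))]
    simp

theorem pvSplitDot_append_dot (p rest : List Char) (h : '.' ∉ p) :
    pvSplitDot (p ++ '.' :: rest) = p :: pvSplitDot rest := by
  induction p with
  | nil => simp [pvSplitDot]
  | cons c cs ih =>
    have hc : c ≠ '.' := fun hh => h (by simp [hh])
    rw [List.cons_append, pvSplitDot, if_neg hc, ih (fun hh => h (by simp [hh]))]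
    simp

theorem pvSplitDot_joinDot (ps : List (List Char)) (hne : ps ≠ [])
    (hnd : ∀ p ∈ ps, '.' ∉ p) : pvSplitDot (pvJoinDot ps) = ps := by
  induction ps with
  | nil => exact absurd rfl hne
  | cons p qs ih =>
    cases qs with
    | nil => exact pvSplitDot_nodot p (hnd p (by simp))
    | cons q rs =>
      rw [pvJoinDot_cons _ _ (by simp), pvSplitDot_append_dot _ _ (hnd p (by simp)),
        ih (by simp) (fun r hr => hnd r (by simp [hr]))]

theorem pvBit_ne_dot (c : Char) (h : (decide (c = '0') || decide (c = '1')) = true) : c ≠ '.' := by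
  rintro rfl; simp at h

theorem pvGroups_iff (k : Nat) (cs : List Char) :
    pvGroups k cs = true ↔
      (pvSplitDot cs).length = k + 1 ∧ ∀ p ∈ pvSplitDot cs, pvOk p = true := by
  induction k generalizing cs with
  | zero =>
    rw [pvGroups]
    split_ifs with hC
    · simp only [false_iff]
      rintro ⟨hlen, hall⟩
      obtain ⟨p, ps, hps⟩ : ∃ p ps, pvSplitDot cs = p :: ps :=
        match hh : pvSplitDot cs with
        | [] => absurd hh (pvSplitDot_ne_nil cs)
        | p :: ps => ⟨p, ps, rfl⟩
      have hok := hall p (by simp [hps])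
      rw [pvOk, Bool.and_eq_true] at hok
      have hp8 : p.length = 8 := by simpa using hok.1
      have hlen0 : ps = [] := by
        rw [hps] at hlen; simpa using hlen
      have hcs : cs = p := by
        have := pvJoinDot_splitDot cs
        rw [hps, hlen0] at this
        simpa [pvJoinDot] using this.symm
      subst hcs
      rw [List.take_of_length_le (by omega)] at hC
      simp [hp8, hok.2] at hC
    · simp only [Bool.or_eq_true, not_or, Bool.not_eq_true', Bool.not_eq_false] at hC
      obtain ⟨hlen8, hbits⟩ := hC
      have hlen8' : 8 ≤ cs.length := by simpa using hlen8
      have hnd : '.' ∉ cs.take 8 := fun hmem =>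
        pvBit_ne_dot _ (List.all_eq_true.mp hbits _ hmem) rfl
      constructor
      · intro h
        have hrest : cs.drop 8 = [] := by simpa using h
        have hcs : cs = cs.take 8 := by
          conv_lhs => rw [← List.take_append_drop 8 cs]
          rw [hrest, List.append_nil]
        rw [hcs, pvSplitDot_nodot _ hnd]
        refine ⟨rfl, ?_⟩
        intro p hp
        simp only [List.mem_singleton] at hp
        subst hp
        rw [pvOk, Bool.and_eq_true]
        exact ⟨by simp [List.length_take]; omega, hbits⟩
      · rintro ⟨hlen, hall⟩
        obtain ⟨p, ps, hps⟩ : ∃ p ps, pvSplitDot cs = p :: ps :=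
          match hh : pvSplitDot cs with
          | [] => absurd hh (pvSplitDot_ne_nil cs)
          | p :: ps => ⟨p, ps, rfl⟩
        have hps0 : ps = [] := by rw [hps] at hlen; simpa using hlen
        have hok := hall p (by simp [hps])
        rw [pvOk, Bool.and_eq_true] at hok
        have hp8 : p.length = 8 := by simpa using hok.1
        have hcs : cs = p := by
          have := pvJoinDot_splitDot cs
          rw [hps, hps0] at this
          simpa [pvJoinDot] using this.symm
        subst hcs
        have hd : List.drop 8 cs = [] := List.drop_eq_nil_of_le (by omega)
        simp [hd]
  | succ k ih =>
    rw [pvGroups]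
    split_ifs with hC
    · simp only [false_iff]
      rintro ⟨hlen, hall⟩
      obtain ⟨p, ps, hps⟩ : ∃ p ps, pvSplitDot cs = p :: ps :=
        match hh : pvSplitDot cs with
        | [] => absurd hh (pvSplitDot_ne_nil cs)
        | p :: ps => ⟨p, ps, rfl⟩
      have hok := hall p (by simp [hps])
      rw [pvOk, Bool.and_eq_true] at hok
      have hp8 : p.length = 8 := by simpa using hok.1
      have hpsne : ps ≠ [] := by
        rw [hps] at hlen; simp at hlen; intro hh; rw [hh] at hlen; simp at hlen
      have hcs : cs = p ++ '.' :: pvJoinDot ps := by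
        have := pvJoinDot_splitDot cs
        rw [hps, pvJoinDot_cons _ _ hpsne] at this
        exact this.symm
      have htk : cs.take 8 = p := by rw [hcs, ← hp8, List.take_left]
      have hgl : 8 ≤ cs.length := by rw [hcs]; simp; omega
      rw [htk] at hC
      simp [hok.2] at hC
      omega
    · simp only [Bool.or_eq_true, not_or, Bool.not_eq_true', Bool.not_eq_false] at hC
      obtain ⟨hlen8, hbits⟩ := hC
      have hlen8' : 8 ≤ cs.length := by simpa using hlen8
      have htk8 : (cs.take 8).length = 8 := by simp [List.length_take]; omega
      have hnd : '.' ∉ cs.take 8 := fun hmem =>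
        pvBit_ne_dot _ (List.all_eq_true.mp hbits _ hmem) rfl
      constructor
      · intro h
        rw [Bool.and_eq_true] at h
        obtain ⟨hdot, hrec⟩ := h
        have hdrop : cs.drop 8 = '.' :: (cs.drop 8).drop 1 := by
          cases hd : cs.drop 8 with
          | nil => rw [hd] at hdot; simp at hdot
          | cons x xs =>
            rw [hd] at hdot; simp at hdot
            simp [hdot]
        have hcs : cs = cs.take 8 ++ '.' :: (cs.drop 8).drop 1 := by
          conv_lhs => rw [← List.take_append_drop 8 cs]
          rw [← hdrop]
        obtain ⟨hl, ha⟩ := (ih _).mp hrec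
        rw [hcs, pvSplitDot_append_dot _ _ hnd]
        refine ⟨by simp only [List.length_cons, hl], ?_⟩
        intro p hp
        rcases List.mem_cons.mp hp with hp | hp
        · subst hp
          rw [pvOk, Bool.and_eq_true]
          exact ⟨by simp [htk8], hbits⟩
        · exact ha p hp
      · rintro ⟨hlen, hall⟩
        obtain ⟨p, ps, hps⟩ : ∃ p ps, pvSplitDot cs = p :: ps :=
          match hh : pvSplitDot cs with
          | [] => absurd hh (pvSplitDot_ne_nil cs)
          | p :: ps => ⟨p, ps, rfl⟩
        have hok := hall p (by simp [hps])
        rw [pvOk, Bool.and_eq_true] at hok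
        have hp8 : p.length = 8 := by simpa using hok.1
        have hpsne : ps ≠ [] := by
          rw [hps] at hlen; simp at hlen; intro hh; rw [hh] at hlen; simp at hlen
        have hcs : cs = p ++ '.' :: pvJoinDot ps := by
          have := pvJoinDot_splitDot cs
          rw [hps, pvJoinDot_cons _ _ hpsne] at this
          exact this.symm
        have htk : cs.take 8 = p := by
          rw [hcs, ← hp8, List.take_left]
        have hdr : cs.drop 8 = '.' :: pvJoinDot ps := by
          rw [hcs, ← hp8, List.drop_left]
        rw [hdr]
        simp only [List.take_cons, List.drop_succ_cons, List.drop_zero]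
        simp only [Bool.and_eq_true]
        refine ⟨by simp, ?_⟩
        have hsp : pvSplitDot (pvJoinDot ps) = ps :=
          pvSplitDot_joinDot ps hpsne
            (fun q hq => pvNodot_splitDot cs q (by rw [hps]; exact List.mem_cons_of_mem _ hq))
        rw [ih, hsp]
        constructor
        · rw [hps] at hlen; simpa using hlen
        · intro q hq; exact hall q (by rw [hps]; exact List.mem_cons_of_mem _ hq)

theorem pvIsIn_bit (c : Char) :
    PySem.Chars.isIn [c] ['0', '1'] = (decide (c = '0') || decide (c = '1')) := by
  cases hb : (decide (c = '0') || decide (c = '1')) with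
  | true =>
    refine (PySem.Chars.isIn_iff_infix _ _).mpr ?_
    refine (List.singleton_infix_iff _ _).mpr ?_
    rcases Bool.or_eq_true_iff.mp hb with h | h <;> simp_all
  | false =>
    refine PySem.Chars.isIn_eq_false_iff _ _ |>.mpr ?_
    intro hinf
    have hmem := (List.singleton_infix_iff _ _).mp hinf
    simp only [List.mem_cons, List.not_mem_nil, or_false] at hmem
    simp only [Bool.or_eq_false_iff, decide_eq_false_iff_not] at hb
    rcases hmem with h | h
    · exact hb.1 h
    · exact hb.2 h

theorem pvPart_eq (p : List Char) :
    (!(decide (PySem.Str.len (String.ofList p) ≠ 8) ||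
      !((String.ofList p).toList.all (fun bit => PySem.Chars.isIn [bit] "01".toList)))) = pvOk p := by
  have h01 : ("01".toList : List Char) = ['0', '1'] := rfl
  simp only [h01, pvIsIn_bit, pvOk]
  simp only [PySem.Str.len_eq, String.toList_ofList]
  simp only [Bool.not_or, Bool.not_not]
  congr 1
  simp only [decide_not, Bool.not_not]
  refine decide_eq_decide.mpr ?_
  omega

theorem pvA_char (s : String) :
    validar_binario s = true ↔
      (pvSplitDot s.toList).length = 4 ∧ ∀ p ∈ pvSplitDot s.toList, pvOk p = true := by
  have hsplit : (PySem.Str.split? s ".").getD [] = (pvSplitDot s.toList).map String.ofList := by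
    rw [PySem.Str.split?]
    have hd : (".".toList : List Char) = ['.'] := rfl
    rw [hd, PySem.Chars.split?]
    simp [pvSplitOn_eq_splitDot]
  rw [validar_binario]
  simp only [hsplit, List.length_map, List.all_map]
  split_ifs with h
  · simp only [false_iff]
    rintro ⟨h4, _⟩; exact h h4
  · push_neg at h
    simp only [Function.comp_def, pvPart_eq, List.all_eq_true]
    exact ⟨fun hall => ⟨h, hall⟩, fun ⟨_, hall⟩ => hall⟩

-- ===== VERDICT (by name: the statement is the Claim_ definition above) =====
theorem validar_binario_spec : Claim_equal_validar_binario := by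
  intro s _
  unfold Spec_validar_binario validar_binario_alt
  refine Bool.eq_iff_iff.mpr ?_
  rw [pvA_char, pvGroups_iff]
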